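-- pv_equiv track=rewrite | github.com/saurabh-pandey/EPIJudgeClone | epi_judge_python/smallest_subarray_covering_all_values.py | find_smallest_sequentially_covering_subset_v2
-- ===== SOURCE A (Python) =====
-- import collections
-- from typing import List
--
-- Subarray = collections.namedtuple('Subarray', ('start', 'end'))
--
-- def find_smallest_sequentially_covering_subset_v2(paragraph: List[str],
--                                                   keywords: List[str]
--                                                   ) -> Subarray:
--     '''
--     A brute-force O(n^2) version with O(1) space
--     '''
--     start, end = -1, -1
--     for left, word in enumerate(paragraph):
--         if word == keywords[0]:
--             # Since first keyword is found, now find the subset anchored at this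
--             # starting point
--             right = left + 1
--             kw_found = 1
--             while kw_found < len(keywords) and right < len(paragraph):
--                 if keywords[kw_found] == paragraph[right]:
--                     kw_found += 1
--                 right += 1
--             if kw_found == len(keywords):
--                 if (start, end) == (-1, -1):
--                     start, end = left, right - 1
--                 elif right - left -1 < end - start:
--                     start, end = left, right - 1
--     return start, end
-- ===== SOURCE B (Python) =====
-- def find_smallest_sequentially_covering_subset_v2(paragraph, keywords):
--     # Index each word's occurrence positions once, then for each anchor
--     # (occurrence of keywords[0]) jump keyword-to-keyword by binary search;
--     # stop early once a window of the minimum possible width is found.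
--     occ = {}
--     for i, w in enumerate(paragraph):
--         occ.setdefault(w, []).append(i)
--     first = keywords[0]
--     rest = keywords[1:]
--     k1 = len(keywords) - 1
--     start, end = -1, -1
--     for left in occ.get(first, []):
--         pos = left
--         ok = True
--         for kw in rest:
--             lst = occ.get(kw, [])
--             # binary search: first index j with lst[j] > pos
--             lo, hi = 0, len(lst)
--             while lo < hi:
--                 mid = (lo + hi) // 2
--                 if lst[mid] <= pos:
--                     lo = mid + 1
--                 else:
--                     hi = mid
--             if lo == len(lst):
--                 ok = False
--                 break
--             pos = lst[lo]
--         if ok: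
--             if start == -1 or pos - left < end - start:
--                 start, end = left, pos
--                 if end - start == k1:
--                     break
--     return start, end
-- ===== Notes on version B (the rewrite author's own statement) =====
-- stated objective: faster
-- what changed: B builds a word-to-positions index of the paragraph once and, for each occurrence of the first keyword, jumps from keyword to keyword by binary search over that keyword's position list, instead of A's re-scan of the paragraph suffix for every anchor.
-- outside the precondition, e.g. on find_smallest_sequentially_covering_subset_v2([], []): A returns (-1, -1), B raises IndexError
import Mathlib
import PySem

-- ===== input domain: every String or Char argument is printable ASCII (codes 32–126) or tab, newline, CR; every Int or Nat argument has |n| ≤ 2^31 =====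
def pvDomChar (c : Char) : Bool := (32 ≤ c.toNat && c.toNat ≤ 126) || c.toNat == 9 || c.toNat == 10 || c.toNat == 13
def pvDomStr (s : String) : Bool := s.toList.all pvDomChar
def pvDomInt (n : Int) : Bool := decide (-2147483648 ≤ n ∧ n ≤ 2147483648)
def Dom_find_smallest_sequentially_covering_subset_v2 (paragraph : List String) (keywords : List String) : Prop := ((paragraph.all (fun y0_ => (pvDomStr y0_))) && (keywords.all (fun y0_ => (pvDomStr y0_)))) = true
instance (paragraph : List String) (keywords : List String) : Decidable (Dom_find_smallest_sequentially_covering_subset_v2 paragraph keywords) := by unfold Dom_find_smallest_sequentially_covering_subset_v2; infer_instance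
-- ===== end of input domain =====

-- B replaces A's per-anchor rescan of the paragraph with a word→positions index built once,
-- jumping keyword-to-keyword by binary search and stopping at a minimum-width window;
-- the RETURN values are proved equal on Pre_.

-- ===== PORT A =====
-- A's inner while loop: scan right, advancing kw_found on a match

def pvWhileA (keywords paragraph : List String) (kw_found right : Int) : Int × Int :=
  if _h : kw_found < (keywords.length : Int) ∧ right < (paragraph.length : Int) then
    let kw_found' := if PySem.List.pyGetD keywords kw_found "" == PySem.List.pyGetD paragraph right "" then kw_found + 1 else kw_found
    pvWhileA keywords paragraph kw_found' (right + 1)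
  else (kw_found, right)
termination_by ((paragraph.length : Int) - right).toNat
decreasing_by omega

def find_smallest_sequentially_covering_subset_v2 (paragraph : List String) (keywords : List String) : Int × Int :=
  (PySem.List.enumerate paragraph 0).foldl (fun se lw =>
    if lw.2 == PySem.List.pyGetD keywords 0 "" then
      let res := pvWhileA keywords paragraph 1 (lw.1 + 1)
      if res.1 == (keywords.length : Int) then
        if se == ((-1 : Int), (-1 : Int)) then (lw.1, res.2 - 1)
        else if res.2 - lw.1 - 1 < se.2 - se.1 then (lw.1, res.2 - 1)
        else se
      else se
    else se) (-1, -1)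

-- ===== PORT B =====
-- occ: each word mapped to the (ascending) list of its positions

def pvBuildOcc (paragraph : List String) : PySem.Dict String (List Int) :=
  (PySem.List.enumerate paragraph 0).foldl (fun occ iw => occ.modify iw.2 [] (fun t => t ++ [iw.1])) PySem.Dict.empty

-- hand-written binary search from Source B: first index j with lst[j] > pos

def pvBisect (lst : List Int) (pos : Int) (lo hi : Int) : Int :=
  if _h : lo < hi then
    let mid := PySem.Int.floordiv (lo + hi) 2
    if PySem.List.pyGetD lst mid 0 ≤ pos then pvBisect lst pos (mid + 1) hi
    else pvBisect lst pos lo mid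
  else lo
termination_by (hi - lo).toNat
decreasing_by
  · have h1 := (PySem.Int.floordiv_two_mid_bounds (le_of_lt _h)).1
    omega
  · have h3 : PySem.Int.floordiv (lo + hi) 2 < hi := by
      rw [PySem.Int.floordiv_lt_iff_lt_mul (by omega)]; omega
    omega

-- the inner for-loop of Source B over rest = keywords[1:], with its break

def pvChaseB (occ : PySem.Dict String (List Int)) : List String → Int → Int × Bool
  | [], pos => (pos, true)
  | kw :: rest, pos =>
    let lst := occ.getD kw []
    let j := pvBisect lst pos 0 (lst.length : Int)
    if j == (lst.length : Int) then (pos, false)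
    else pvChaseB occ rest (PySem.List.pyGetD lst j 0)

-- the anchor loop of Source B (its for with break, as structural recursion)

def pvLoopB (occ : PySem.Dict String (List Int)) (rest : List String) (k1 : Int) : List Int → Int × Int → Int × Int
  | [], st => st
  | left :: more, st =>
    let r := pvChaseB occ rest left
    if r.2 then
      if st.1 = (-1 : Int) ∨ r.1 - left < st.2 - st.1 then
        if r.1 - left = k1 then (left, r.1)
        else pvLoopB occ rest k1 more (left, r.1)
      else pvLoopB occ rest k1 more st
    else pvLoopB occ rest k1 more st

def find_smallest_sequentially_covering_subset_v2_alt (paragraph : List String) (keywords : List String) : Int × Int :=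
  let occ := pvBuildOcc paragraph
  let first := PySem.List.pyGetD keywords 0 ""
  pvLoopB occ (PySem.List.slice keywords (some 1) none) ((keywords.length : Int) - 1)
    (occ.getD first []) (-1, -1)

-- ===== PRECONDITION & SPEC =====
-- Pre_ excludes empty keyword lists: there A raises IndexError on keywords[0] whenever the
-- paragraph is nonempty (returning (-1,-1) only vacuously on an empty paragraph), while B's
-- up-front keywords[0] indexing raises on every empty keyword list.
def Pre_find_smallest_sequentially_covering_subset_v2 (paragraph : List String) (keywords : List String) : Prop := keywords ≠ []
instance (paragraph : List String) (keywords : List String) : Decidable (Pre_find_smallest_sequentially_covering_subset_v2 paragraph keywords) := by unfold Pre_find_smallest_sequentially_covering_subset_v2; infer_instance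

def pvWitness_find_smallest_sequentially_covering_subset_v2 : List String × List String := (["a", "c", "b"], ["a", "b"])

def Spec_find_smallest_sequentially_covering_subset_v2 (paragraph : List String) (keywords : List String) (out : Int × Int) : Prop := out = find_smallest_sequentially_covering_subset_v2_alt paragraph keywords
instance (paragraph : List String) (keywords : List String) (out : Int × Int) : Decidable (Spec_find_smallest_sequentially_covering_subset_v2 paragraph keywords out) := by unfold Spec_find_smallest_sequentially_covering_subset_v2; infer_instance

-- ===== CLAIM (what is proved, stated in full; the proofs are below) =====
def Claim_equal_find_smallest_sequentially_covering_subset_v2 : Prop := ∀ (paragraph : List String) (keywords : List String), Dom_find_smallest_sequentially_covering_subset_v2 paragraph keywords → Pre_find_smallest_sequentially_covering_subset_v2 paragraph keywords → Spec_find_smallest_sequentially_covering_subset_v2 paragraph keywords (find_smallest_sequentially_covering_subset_v2 paragraph keywords)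

-- ===== LEMMAS AND PROOFS =====

-- Reference semantics shared by both proofs: earliest occurrence of kw at index ≥ r,
-- and the sequential chase through the keywords from scan index r (returns last match + 1).

def pvFind (para : List String) (kw : String) (r : Nat) : Option Nat :=
  if h : r < para.length then (if para[r] = kw then some r else pvFind para kw (r + 1)) else none
termination_by para.length - r

def pvChase (para : List String) : List String → Nat → Option Nat
  | [], r => some r
  | kw :: rest, r =>
    match pvFind para kw r with
    | some m => pvChase para rest (m + 1)
    | none => none

def pvAnchors (paragraph : List String) (w : String) : List Int :=
  (PySem.List.enumerate paragraph 0).filterMap (fun iw => if iw.2 = w then some iw.1 else none)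

lemma pvFind_some_iff (para : List String) (kw : String) (r m : Nat) :
    pvFind para kw r = some m ↔
      r ≤ m ∧ ∃ h : m < para.length, para[m] = kw ∧ ∀ i, r ≤ i → i < m → ∀ h' : i < para.length, para[i] ≠ kw := by
  induction hn : para.length - r using Nat.strong_induction_on generalizing r with
  | _ n ih =>
    rw [pvFind]
    by_cases hr : r < para.length
    · simp only [hr, dif_pos]
      by_cases hw : para[r] = kw
      · simp only [hw, if_pos]
        constructor
        · rintro h; cases h
          exact ⟨le_refl _, hr, hw, fun i h1 h2 _ => by omega⟩
        · rintro ⟨h1, hm, h2, h3⟩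
          by_cases hrm : r = m
          · simp [hrm]
          · exact absurd hw (h3 r (le_refl _) (by omega) hr)
      · simp only [hw, ite_false]
        rw [ih (para.length - (r+1)) (by omega) (r+1) rfl]
        constructor
        · rintro ⟨h1, hm, h2, h3⟩
          refine ⟨by omega, hm, h2, fun i hi1 hi2 hi3 => ?_⟩
          rcases Nat.eq_or_lt_of_le hi1 with h | h
          · subst h; exact hw
          · exact h3 i h hi2 hi3
        · rintro ⟨h1, hm, h2, h3⟩
          refine ⟨?_, hm, h2, fun i hi1 hi2 hi3 => h3 i (by omega) hi2 hi3⟩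
          rcases Nat.eq_or_lt_of_le h1 with h | h
          · exact absurd h2 (by subst h; exact hw)
          · omega
    · simp only [hr, dif_neg, not_false_iff]
      constructor
      · rintro ⟨⟩
      · rintro ⟨h1, hm, _⟩; omega

lemma pvFind_none_iff (para : List String) (kw : String) (r : Nat) :
    pvFind para kw r = none ↔ ∀ i, r ≤ i → ∀ h : i < para.length, para[i] ≠ kw := by
  induction hn : para.length - r using Nat.strong_induction_on generalizing r with
  | _ n ih =>
    rw [pvFind]
    by_cases hr : r < para.length
    · simp only [hr, dif_pos]
      by_cases hw : para[r] = kw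
      · simp only [hw, if_pos]
        constructor
        · rintro ⟨⟩
        · intro h; exact absurd hw (h r (le_refl _) hr)
      · simp only [hw, ite_false]
        rw [ih (para.length - (r+1)) (by omega) (r+1) rfl]
        constructor
        · intro h i hi1 hi2
          rcases Nat.eq_or_lt_of_le hi1 with h' | h'
          · subst h'; exact hw
          · exact h i h' hi2
        · intro h i hi1 hi2; exact h i (by omega) hi2
    · simp only [hr, dif_neg, not_false_iff, true_iff]
      intro i h1 h2; omega

-- A's while loop computes pvChase

lemma whileA_exit (keywords paragraph : List String) (r k : Nat)
    (hn : paragraph.length ≤ r) (hk : k ≤ keywords.length) :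
    (∀ m, pvChase paragraph (keywords.drop k) r = some m →
        pvWhileA keywords paragraph (k : Int) (r : Int) = ((keywords.length : Int), (m : Int))) ∧
    (pvChase paragraph (keywords.drop k) r = none →
        (pvWhileA keywords paragraph (k : Int) (r : Int)).1 < (keywords.length : Int)) := by
  rw [pvWhileA, dif_neg (by push_cast; omega)]
  rcases Nat.eq_or_lt_of_le hk with hke | hkl
  · subst hke
    rw [List.drop_length]
    constructor
    · intro m hm
      simp only [pvChase, Option.some.injEq] at hm
      subst hm; rfl
    · intro h; simp [pvChase] at h
  · have hd : keywords.drop k = keywords[k] :: keywords.drop (k + 1) :=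
      (List.getElem_cons_drop ..).symm
    rw [hd]
    have hf : pvFind paragraph keywords[k] r = none := by
      rw [pvFind, dif_neg (by omega)]
    constructor
    · intro m hm; simp only [pvChase, hf] at hm; exact absurd hm (by simp)
    · intro _; simp only; push_cast; omega

lemma whileA_chase (keywords paragraph : List String) (n : Nat) :
    ∀ (r k : Nat), paragraph.length ≤ r + n → k ≤ keywords.length →
    (∀ m, pvChase paragraph (keywords.drop k) r = some m →
        pvWhileA keywords paragraph (k : Int) (r : Int) = ((keywords.length : Int), (m : Int))) ∧
    (pvChase paragraph (keywords.drop k) r = none →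
        (pvWhileA keywords paragraph (k : Int) (r : Int)).1 < (keywords.length : Int)) := by
  induction n with
  | zero =>
    intro r k hn hk
    exact whileA_exit keywords paragraph r k (by omega) hk
  | succ n ih =>
    intro r k hn hk
    by_cases hr : r < paragraph.length
    · rcases Nat.eq_or_lt_of_le hk with hke | hkl
      · subst hke
        rw [pvWhileA, dif_neg (by push_cast; omega)]
        rw [List.drop_length]
        constructor
        · intro m hm
          simp only [pvChase, Option.some.injEq] at hm
          subst hm; rfl
        · intro h; simp [pvChase] at h
      · have hd : keywords.drop k = keywords[k] :: keywords.drop (k + 1) :=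
          (List.getElem_cons_drop ..).symm
        rw [pvWhileA, dif_pos (by constructor <;> (push_cast; omega))]
        simp only [PySem.List.pyGetD_natCast, List.getD_eq_getElem?_getD,
          List.getElem?_eq_getElem hkl, List.getElem?_eq_getElem hr,
          Option.getD_some]
        by_cases hw : keywords[k] = paragraph[r]
        · rw [if_pos (by simpa using hw)]
          have hf : pvFind paragraph keywords[k] r = some r := by
            rw [pvFind, dif_pos hr, if_pos hw.symm]
          rw [hd]
          simp only [pvChase, hf]
          have := ih (r + 1) (k + 1) (by omega) (by omega)
          push_cast
          push_cast at this
          exact this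
        · rw [if_neg (by simpa using hw)]
          have hf : pvFind paragraph keywords[k] r = pvFind paragraph keywords[k] (r + 1) := by
            rw [pvFind, dif_pos hr, if_neg (fun h => hw h.symm)]
          have hch : pvChase paragraph (keywords.drop k) r
              = pvChase paragraph (keywords.drop k) (r + 1) := by
            rw [hd]; simp only [pvChase, hf]
          rw [hch]
          have := ih (r + 1) k (by omega) hk
          push_cast
          push_cast at this
          exact this
    · exact whileA_exit keywords paragraph r k (by omega) hk

-- the dict built by B lists each word's positions, in ascending order

lemma buildOcc_aux (l : List (Int × String)) :
    ∀ (d : PySem.Dict String (List Int)) (w : String),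
    (l.foldl (fun occ iw => occ.modify iw.2 [] (fun t => t ++ [iw.1])) d).getD w []
      = d.getD w [] ++ l.filterMap (fun iw => if iw.2 = w then some iw.1 else none) := by
  induction l with
  | nil => intro d w; simp
  | cons p rest ih =>
    intro d w
    simp only [List.foldl_cons, List.filterMap_cons]
    rw [ih]
    by_cases hw : p.2 = w
    · rw [PySem.Dict.getD_modify]
      simp [hw]
    · rw [PySem.Dict.getD_modify]
      rw [if_neg (fun h : w = p.2 => hw h.symm)]
      simp [hw]

lemma buildOcc_getD (paragraph : List String) (w : String) :
    (pvBuildOcc paragraph).getD w [] = pvAnchors paragraph w := by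
  unfold pvBuildOcc pvAnchors
  rw [buildOcc_aux]
  simp

lemma mem_pvAnchors (paragraph : List String) (w : String) (a : Int) :
    a ∈ pvAnchors paragraph w ↔ ∃ k : Nat, ∃ h : k < paragraph.length, paragraph[k] = w ∧ a = (k : Int) := by
  unfold pvAnchors
  simp only [List.mem_filterMap]
  constructor
  · rintro ⟨p, hp, hpa⟩
    rw [PySem.List.mem_enumerate_iff] at hp
    obtain ⟨k, hk, rfl⟩ := hp
    by_cases h : paragraph[k] = w
    · simp only [h, if_pos, Option.some.injEq] at hpa
      exact ⟨k, hk, h, by omega⟩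
    · simp [h] at hpa
  · rintro ⟨k, hk, hw, rfl⟩
    refine ⟨((k : Int), paragraph[k]), ?_, by simp [hw]⟩
    rw [PySem.List.mem_enumerate_iff]
    exact ⟨k, hk, by simp⟩

lemma pvAnchors_sorted (paragraph : List String) (w : String) :
    (pvAnchors paragraph w).Pairwise (· < ·) := by
  unfold pvAnchors
  rw [List.pairwise_filterMap]
  refine (PySem.List.pairwise_lt_enumerate paragraph 0).imp_of_mem ?_
  intro p q _ _ h x hx y hy
  by_cases h1 : p.2 = w
  · by_cases h2 : q.2 = w
    · simp only [h1, h2, if_pos, Option.some.injEq] at hx hy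
      subst hx; subst hy; exact h
    · simp [h2] at hy
  · simp [h1] at hx

lemma bisect_spec (lst : List Int) (pos : Int) (hs : lst.Pairwise (· < ·)) (n : Nat) :
    ∀ (lo hi : Int), (hi - lo).toNat ≤ n → 0 ≤ lo → lo ≤ hi → hi ≤ lst.length →
    (∀ i : Nat, i < lo.toNat → ∀ h : i < lst.length, lst[i] ≤ pos) →
    (∀ i : Nat, hi.toNat ≤ i → ∀ h : i < lst.length, pos < lst[i]) →
    0 ≤ pvBisect lst pos lo hi ∧ pvBisect lst pos lo hi ≤ lst.length ∧
      (∀ i : Nat, i < (pvBisect lst pos lo hi).toNat → ∀ h : i < lst.length, lst[i] ≤ pos) ∧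
      (∀ i : Nat, (pvBisect lst pos lo hi).toNat ≤ i → ∀ h : i < lst.length, pos < lst[i]) := by
  have hmono : ∀ (i j : Nat) (hi' : i < lst.length) (hj : j < lst.length), i ≤ j → lst[i] ≤ lst[j] := by
    intro i j hi' hj hij
    rcases Nat.eq_or_lt_of_le hij with h | h
    · subst h; rfl
    · exact le_of_lt ((List.pairwise_iff_getElem.mp hs) i j hi' hj h)
  induction n with
  | zero =>
    intro lo hi hn h0 hlh hhl hlow hhigh
    rw [pvBisect, dif_neg (by omega)]
    have : lo = hi := by omega
    subst this
    exact ⟨h0, by omega, hlow, hhigh⟩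
  | succ n ih =>
    intro lo hi hn h0 hlh hhl hlow hhigh
    by_cases hlt : lo < hi
    · rw [pvBisect, dif_pos hlt]
      have hm1 := (PySem.Int.floordiv_two_mid_bounds (le_of_lt hlt)).1
      have hm2 : PySem.Int.floordiv (lo + hi) 2 < hi := by
        rw [PySem.Int.floordiv_lt_iff_lt_mul (by omega)]; omega
      set mid := PySem.Int.floordiv (lo + hi) 2 with hmid
      have hmlen : mid.toNat < lst.length := by omega
      have hget : PySem.List.pyGetD lst mid 0 = lst[mid.toNat] :=
        PySem.List.pyGetD_eq_getElem lst 0 (by omega) (by push_cast; omega)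
      dsimp only
      rw [hget]
      by_cases hle : lst[mid.toNat] ≤ pos
      · rw [if_pos hle]
        refine ih (mid + 1) hi (by omega) (by omega) (by omega) hhl ?_ hhigh
        intro i hi' h
        exact le_trans (hmono i mid.toNat h hmlen (by omega)) hle
      · rw [if_neg hle]
        refine ih lo mid (by omega) h0 (by omega) (by omega) hlow ?_
        intro i hi' h
        exact lt_of_lt_of_le (by omega : pos < lst[mid.toNat]) (hmono mid.toNat i hmlen h (by omega))
    · rw [pvBisect, dif_neg hlt]
      have : lo = hi := by omega
      subst this
      exact ⟨h0, by omega, hlow, hhigh⟩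

-- B's inner loop computes pvChase too

lemma chaseB_chase (paragraph : List String) (ks : List String) :
    ∀ pos : Nat,
      (∀ res, pvChase paragraph ks (pos + 1) = some res →
          pvChaseB (pvBuildOcc paragraph) ks (pos : Int) = ((res : Int) - 1, true)) ∧
      (pvChase paragraph ks (pos + 1) = none →
          (pvChaseB (pvBuildOcc paragraph) ks (pos : Int)).2 = false) := by
  induction ks with
  | nil =>
    intro pos
    constructor
    · intro res hres
      simp only [pvChase, Option.some.injEq] at hres
      subst hres
      simp [pvChaseB]
    · intro h; simp [pvChase] at h
  | cons kw rest ih =>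
    intro pos
    have hlst : (pvBuildOcc paragraph).getD kw [] = pvAnchors paragraph kw := buildOcc_getD paragraph kw
    set lst := (pvBuildOcc paragraph).getD kw [] with hlstdef
    have hs : lst.Pairwise (· < ·) := hlst ▸ pvAnchors_sorted paragraph kw
    have hspec := bisect_spec lst pos hs (lst.length) 0 (lst.length : Int)
      (by omega) (by omega) (by push_cast; omega) (by push_cast; omega)
      (by intro i h1 h2; omega) (by intro i h1 h2; push_cast at h1; omega)
    set j := pvBisect lst pos 0 (lst.length : Int) with hjdef
    obtain ⟨hj0, hjlen, hjlow, hjhigh⟩ := hspec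
    by_cases hend : j = (lst.length : Int)
    · -- nothing > pos: pvFind fails
      have hfind : pvFind paragraph kw (pos + 1) = none := by
        rw [pvFind_none_iff]
        intro i hi h hcontra
        have : (i : Int) ∈ lst := by
          rw [hlst, mem_pvAnchors]; exact ⟨i, h, hcontra, rfl⟩
        obtain ⟨t, ht, hti⟩ := List.mem_iff_getElem.mp this
        have := hjlow t (by omega) ht
        omega
      constructor
      · intro res hres
        simp only [pvChase, hfind] at hres
        exact absurd hres (by simp)
      · intro _
        simp only [pvChaseB]
        rw [← hlstdef, ← hjdef, if_pos (by simpa using hend)]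
    · -- lst[j] is the first occurrence after pos
      have hjlt : j.toNat < lst.length := by omega
      have hgj : PySem.List.pyGetD lst j 0 = lst[j.toNat] :=
        PySem.List.pyGetD_eq_getElem lst 0 hj0 (by push_cast; omega)
      have hmem : lst[j.toNat] ∈ pvAnchors paragraph kw := by
        rw [← hlst]; exact List.getElem_mem hjlt
      rw [mem_pvAnchors] at hmem
      obtain ⟨idx, hidx, hidxw, hidxeq⟩ := hmem
      have hgt : pos < lst[j.toNat] := hjhigh j.toNat (le_refl _) hjlt
      have hfind : pvFind paragraph kw (pos + 1) = some idx := by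
        rw [pvFind_some_iff]
        refine ⟨by omega, hidx, hidxw, ?_⟩
        intro i hi1 hi2 hi3 hcontra
        have : (i : Int) ∈ lst := by
          rw [hlst, mem_pvAnchors]; exact ⟨i, hi3, hcontra, rfl⟩
        obtain ⟨t, ht, hti⟩ := List.mem_iff_getElem.mp this
        -- lst[t] = i < idx = lst[j], sorted → t < j → lst[t] ≤ pos → contradiction with pos+1 ≤ i
        have htj : t < j.toNat := by
          by_contra hc
          have hord : lst[j.toNat] ≤ lst[t] := by
            rcases Nat.eq_or_lt_of_le (Nat.le_of_not_lt hc) with h | h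
            · exact le_of_eq (by simp only [h])
            · exact le_of_lt (List.pairwise_iff_getElem.mp hs j.toNat t hjlt ht h)
          omega
        have := hjlow t htj ht
        omega
      constructor
      · intro res hres
        simp only [pvChase, hfind] at hres
        simp only [pvChaseB]
        rw [← hlstdef, ← hjdef, if_neg (by simpa using hend), hgj, hidxeq]
        exact (ih idx).1 res hres
      · intro hnone
        simp only [pvChase, hfind] at hnone
        simp only [pvChaseB]
        rw [← hlstdef, ← hjdef, if_neg (by simpa using hend), hgj, hidxeq]
        exact (ih idx).2 hnone

-- A's fold step (definitionally the lambda of port A)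

def pvStepA (paragraph keywords : List String) (se : Int × Int) (lw : Int × String) : Int × Int :=
  if lw.2 == PySem.List.pyGetD keywords 0 "" then
    let res := pvWhileA keywords paragraph 1 (lw.1 + 1)
    if res.1 == (keywords.length : Int) then
      if se == ((-1 : Int), (-1 : Int)) then (lw.1, res.2 - 1)
      else if res.2 - lw.1 - 1 < se.2 - se.1 then (lw.1, res.2 - 1)
      else se
    else se
  else se

-- a successful chase over ks starting at r ends at least ks.length later

lemma chase_ge (para : List String) (ks : List String) :
    ∀ r m, pvChase para ks r = some m → r + ks.length ≤ m := by
  induction ks with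
  | nil => intro r m h; simp only [pvChase, Option.some.injEq] at h; simp only [List.length_nil]; omega
  | cons kw rest ih =>
    intro r m h
    simp only [pvChase] at h
    cases hf : pvFind para kw r with
    | none => rw [hf] at h; exact absurd h (by simp)
    | some p =>
      rw [hf] at h
      have hp := (pvFind_some_iff para kw r p).mp hf
      have := ih (p + 1) m h
      simp only [List.length_cons]
      omega

-- once a window of minimal width is recorded, no further A step changes the state

lemma stepA_stuck (paragraph keywords : List String) (hne : keywords ≠ [])
    (st : Int × Int) (hs1 : st.1 ≠ -1) (hw : st.2 - st.1 = (keywords.length : Int) - 1)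
    (p : Int × String) (hp : ∃ n : Nat, p.1 = (n : Int)) :
    pvStepA paragraph keywords st p = st := by
  obtain ⟨n, hn⟩ := hp
  have hlen : 1 ≤ keywords.length := List.length_pos_of_ne_nil hne
  unfold pvStepA
  by_cases hword : p.2 == PySem.List.pyGetD keywords 0 ""
  · rw [if_pos hword]
    have hA := whileA_chase keywords paragraph paragraph.length (n + 1) 1 (by omega) (by omega)
    cases hch : pvChase paragraph (keywords.drop 1) (n + 1) with
    | none =>
      have h1 := hA.2 hch
      simp only [hn]
      rw [show ((n : Int) + 1) = ((n + 1 : Nat) : Int) by push_cast; ring]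
      rw [if_neg (by simpa using (ne_of_lt h1))]
    | some res =>
      have h1 := hA.1 res hch
      have hge := chase_ge paragraph (keywords.drop 1) (n + 1) res hch
      rw [List.length_drop] at hge
      simp only [hn]
      rw [show ((n : Int) + 1) = ((n + 1 : Nat) : Int) by push_cast; ring]
      rw [show pvWhileA keywords paragraph 1 (((n + 1 : Nat)) : Int)
            = ((keywords.length : Int), (res : Int)) from by exact_mod_cast h1]
      simp only
      rw [if_pos (by simp)]
      obtain ⟨s1, s2⟩ := st
      simp only at hs1 hw
      rw [if_neg (by simp [hs1])]
      rw [if_neg (by simp only; omega)]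
  · rw [if_neg hword]

lemma foldA_stuck (paragraph keywords : List String) (hne : keywords ≠ []) :
    ∀ (l : List (Int × String)) (st : Int × Int),
    (∀ p ∈ l, ∃ n : Nat, p.1 = (n : Int)) →
    st.1 ≠ -1 → st.2 - st.1 = (keywords.length : Int) - 1 →
    l.foldl (pvStepA paragraph keywords) st = st := by
  intro l
  induction l with
  | nil => intro st _ _ _; rfl
  | cons p rest ih =>
    intro st hmem hs1 hw
    rw [List.foldl_cons, stepA_stuck paragraph keywords hne st hs1 hw p (hmem p (by simp))]
    exact ih st (fun q hq => hmem q (by simp [hq])) hs1 hw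

lemma fold_bridge (paragraph keywords : List String) (hne : keywords ≠ []) :
    ∀ (l : List (Int × String)) (st : Int × Int),
    (∀ p ∈ l, ∃ n : Nat, p.1 = (n : Int)) → (st.1 = -1 → st.2 = -1) →
    l.foldl (pvStepA paragraph keywords) st
      = pvLoopB (pvBuildOcc paragraph) (PySem.List.slice keywords (some 1) none)
          ((keywords.length : Int) - 1)
          (l.filterMap (fun iw => if iw.2 = PySem.List.pyGetD keywords 0 "" then some iw.1 else none)) st := by
  have hlen : 1 ≤ keywords.length := List.length_pos_of_ne_nil hne
  have hslice : PySem.List.slice keywords (some 1) none = keywords.drop 1 := by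
    rw [PySem.List.slice_from_one, ← List.drop_one]
  intro l
  induction l with
  | nil => intro st _ _; simp [pvLoopB]
  | cons p rest ih =>
    intro st hmem hinv
    obtain ⟨n, hn⟩ := hmem p (by simp)
    simp only [List.foldl_cons, List.filterMap_cons]
    by_cases hword : p.2 = PySem.List.pyGetD keywords 0 ""
    · rw [if_pos hword]
      have hA := whileA_chase keywords paragraph paragraph.length (n + 1) 1 (by omega) (by omega)
      have hB := chaseB_chase paragraph (keywords.drop 1) n
      have hstepA : pvStepA paragraph keywords st p
          = (if (pvWhileA keywords paragraph 1 ((n : Int) + 1)).1 == (keywords.length : Int) then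
              if st == ((-1 : Int), (-1 : Int)) then ((n : Int), (pvWhileA keywords paragraph 1 ((n : Int) + 1)).2 - 1)
              else if (pvWhileA keywords paragraph 1 ((n : Int) + 1)).2 - (n : Int) - 1 < st.2 - st.1 then ((n : Int), (pvWhileA keywords paragraph 1 ((n : Int) + 1)).2 - 1)
              else st
            else st) := by
        unfold pvStepA
        rw [if_pos (by simp [hword]), hn]
      cases hch : pvChase paragraph (keywords.drop 1) (n + 1) with
      | none =>
        have h1 := hA.2 hch
        have h2 := hB.2 hch
        rw [hstepA]
        rw [show ((n : Int) + 1) = ((n + 1 : Nat) : Int) by push_cast; ring]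
        rw [if_neg (by simpa using (ne_of_lt h1))]
        rw [← hslice] at h2
        simp only [pvLoopB, hn, h2, Bool.false_eq_true, if_false]
        exact ih st (fun q hq => hmem q (by simp [hq])) hinv
      | some res =>
        have h1 := hA.1 res hch
        have h2 := hB.1 res hch
        have hge := chase_ge paragraph (keywords.drop 1) (n + 1) res hch
        rw [List.length_drop] at hge
        rw [hstepA]
        rw [show ((n : Int) + 1) = ((n + 1 : Nat) : Int) by push_cast; ring]
        rw [show pvWhileA keywords paragraph 1 (((n + 1 : Nat)) : Int)
              = ((keywords.length : Int), (res : Int)) from by exact_mod_cast h1]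
        simp only
        rw [if_pos (by simp)]
        rw [← hslice] at h2
        simp only [pvLoopB, hn, h2]
        rw [if_pos trivial]
        obtain ⟨s1, s2⟩ := st
        simp only at hinv ⊢
        by_cases hs1 : s1 = -1
        · have hs2 := hinv hs1
          subst hs1; subst hs2
          rw [if_pos (by simp), if_pos (Or.inl rfl)]
          by_cases hbr : (res : Int) - 1 - (n : Int) = (keywords.length : Int) - 1
          · rw [if_pos hbr]
            exact foldA_stuck paragraph keywords hne rest ((n : Int), (res : Int) - 1)
              (fun q hq => hmem q (by simp [hq])) (by simp only; omega) (by simp only; omega)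
          · rw [if_neg hbr]
            exact ih ((n : Int), (res : Int) - 1) (fun q hq => hmem q (by simp [hq]))
              (by intro h; simp only at h; omega)
        · rw [if_neg (by simp [hs1])]
          by_cases hc : (res : Int) - (n : Int) - 1 < s2 - s1
          · rw [if_pos hc, if_pos (Or.inr (by omega))]
            by_cases hbr : (res : Int) - 1 - (n : Int) = (keywords.length : Int) - 1
            · rw [if_pos hbr]
              exact foldA_stuck paragraph keywords hne rest ((n : Int), (res : Int) - 1)
                (fun q hq => hmem q (by simp [hq])) (by simp only; omega) (by simp only; omega)
            · rw [if_neg hbr]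
              exact ih ((n : Int), (res : Int) - 1) (fun q hq => hmem q (by simp [hq]))
                (by intro h; simp only at h; omega)
          · rw [if_neg hc,
                if_neg (show ¬(s1 = -1 ∨ (res : Int) - 1 - (n : Int) < s2 - s1) from by
                  rw [not_or]; exact ⟨hs1, by omega⟩)]
            exact ih (s1, s2) (fun q hq => hmem q (by simp [hq])) hinv
    · rw [if_neg hword]
      have hstepA : pvStepA paragraph keywords st p = st := by
        unfold pvStepA
        rw [if_neg (by simpa using hword)]
      rw [hstepA]
      exact ih st (fun q hq => hmem q (by simp [hq])) hinv

theorem pv_main (paragraph keywords : List String) (hne : keywords ≠ []) :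
    find_smallest_sequentially_covering_subset_v2 paragraph keywords
      = find_smallest_sequentially_covering_subset_v2_alt paragraph keywords := by
  show (PySem.List.enumerate paragraph 0).foldl (pvStepA paragraph keywords) (-1, -1)
      = pvLoopB (pvBuildOcc paragraph) (PySem.List.slice keywords (some 1) none)
          ((keywords.length : Int) - 1)
          ((pvBuildOcc paragraph).getD (PySem.List.pyGetD keywords 0 "") []) (-1, -1)
  rw [buildOcc_getD]
  rw [fold_bridge paragraph keywords hne (PySem.List.enumerate paragraph 0) (-1, -1) ?_ (by intro; rfl)]
  · rfl
  · intro p hp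
    rw [PySem.List.mem_enumerate_iff] at hp
    obtain ⟨k, hk, rfl⟩ := hp
    exact ⟨k, by simp⟩

-- ===== VERDICT (by name: the statement is the Claim_ definition above) =====
theorem find_smallest_sequentially_covering_subset_v2_spec : Claim_equal_find_smallest_sequentially_covering_subset_v2 := by
  intro paragraph keywords _hdom hpre
  unfold Spec_find_smallest_sequentially_covering_subset_v2
  exact pv_main paragraph keywords hpre
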